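-- pv_equiv track=rewrite | github.com/Jeihyuck/Salesbot | rubicon-main/apps/rubicon_v3/__function/_62_complement_code_mapping_utils.py | categorize_split_lists
-- ===== SOURCE A (Python) =====
-- def categorize_split_lists(split_lists):
--     c_items = []
--     m_items = []
--     om_items = []
--     other_lists = []
--
--     for sublist in split_lists:
--         if len(sublist) == 1:
--             item = sublist[0]
--             field = item.get('field')
--             operator = item.get('operator')
--
--             if field == 'product_color':
--                 c_items.append(item)
--             elif field == 'product_model' or field == 'product_code':
--                 m_items.append(item)
--             elif field == 'product_option' and operator in ['min', 'max']:
--                 om_items.append(item)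
--             else:
--                 other_lists.append(sublist)
--         else:
--             other_lists.append(sublist)
--
--     return c_items, m_items, om_items, other_lists
-- ===== SOURCE B (Python) =====
-- def categorize_split_lists(split_lists):
--     def kind(s):
--         if len(s) != 1:
--             return 3
--         item = s[0]
--         f = item.get('field')
--         if f == 'product_color':
--             return 0
--         if f in ('product_model', 'product_code'):
--             return 1
--         if f == 'product_option' and item.get('operator') in ('min', 'max'):
--             return 2
--         return 3
--
--     c_items = [s[0] for s in split_lists if kind(s) == 0]
--     m_items = [s[0] for s in split_lists if kind(s) == 1]
--     om_items = [s[0] for s in split_lists if kind(s) == 2]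
--     other_lists = [s for s in split_lists if kind(s) == 3]
--     return c_items, m_items, om_items, other_lists
-- ===== Notes on version B (the rewrite author's own statement) =====
-- stated objective: alternative
-- what changed: Replaces A's single routing loop with four-way accumulator mutation by a shared classifier 'kind' and four independent comprehensions over split_lists, one per bucket.
import Mathlib
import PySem

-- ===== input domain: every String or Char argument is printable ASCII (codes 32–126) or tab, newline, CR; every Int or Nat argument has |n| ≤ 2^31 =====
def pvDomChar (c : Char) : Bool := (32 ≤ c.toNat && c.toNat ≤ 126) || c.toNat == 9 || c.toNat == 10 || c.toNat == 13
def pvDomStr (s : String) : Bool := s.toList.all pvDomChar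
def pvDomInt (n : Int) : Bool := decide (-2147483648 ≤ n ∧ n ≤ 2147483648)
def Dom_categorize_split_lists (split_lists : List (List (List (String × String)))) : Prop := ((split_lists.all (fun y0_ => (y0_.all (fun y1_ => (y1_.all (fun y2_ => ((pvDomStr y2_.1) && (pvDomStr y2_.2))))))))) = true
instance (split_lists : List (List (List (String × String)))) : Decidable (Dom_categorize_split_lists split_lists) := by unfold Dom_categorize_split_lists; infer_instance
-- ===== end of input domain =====

-- One honest line: B replaces A's single routing loop (four mutable buckets) with a
-- classifier and four independent comprehensions, one per bucket; same cost, alternative structure.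

-- dict.get(k): first-match lookup in the association list (shared by both ports)
def pvAssocGet? (item : List (String × String)) (k : String) : Option String :=
  (item.find? (fun p => p.1 == k)).map (·.2)

-- ===== PORT A =====
-- loop body of A (one step of the for-loop, state = the four buckets)
def pvStepA (acc : (List (List (String × String))) × (List (List (String × String))) × (List (List (String × String))) × (List (List (List (String × String))))) (sublist : List (List (String × String))) :
    (List (List (String × String))) × (List (List (String × String))) × (List (List (String × String))) × (List (List (List (String × String)))) :=
  let (c, m, om, oth) := acc
  if sublist.length == 1 then
    match sublist with
    | item :: _ =>
      let field := pvAssocGet? item "field"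
      let operator := pvAssocGet? item "operator"
      if field == some "product_color" then (c ++ [item], m, om, oth)
      else if field == some "product_model" || field == some "product_code" then (c, m ++ [item], om, oth)
      else if field == some "product_option" && (operator == some "min" || operator == some "max") then (c, m, om ++ [item], oth)
      else (c, m, om, oth ++ [sublist])
    | [] => (c, m, om, oth ++ [sublist])  -- unreachable: length == 1
  else (c, m, om, oth ++ [sublist])

def categorize_split_lists (split_lists : List (List (List (String × String)))) : (List (List (String × String))) × (List (List (String × String))) × (List (List (String × String))) × (List (List (List (String × String)))) :=
  split_lists.foldl pvStepA ([], [], [], [])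

-- ===== PORT B =====
-- B's classifier: 0 = color, 1 = model/code, 2 = option min/max, 3 = other
def pvKind (s : List (List (String × String))) : Nat :=
  if s.length != 1 then 3
  else match s with
  | item :: _ =>
    let f := pvAssocGet? item "field"
    if f == some "product_color" then 0
    else if f == some "product_model" || f == some "product_code" then 1
    else if f == some "product_option" && (pvAssocGet? item "operator" == some "min" || pvAssocGet? item "operator" == some "max") then 2
    else 3
  | [] => 3

def categorize_split_lists_alt (split_lists : List (List (List (String × String)))) : (List (List (String × String))) × (List (List (String × String))) × (List (List (String × String))) × (List (List (List (String × String)))) :=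
  ((split_lists.filter (fun s => pvKind s == 0)).map (fun s => s.headD []),
   (split_lists.filter (fun s => pvKind s == 1)).map (fun s => s.headD []),
   (split_lists.filter (fun s => pvKind s == 2)).map (fun s => s.headD []),
   split_lists.filter (fun s => pvKind s == 3))

-- ===== PRECONDITION & SPEC =====
def Spec_categorize_split_lists (split_lists : List (List (List (String × String)))) (out : (List (List (String × String))) × (List (List (String × String))) × (List (List (String × String))) × (List (List (List (String × String))))) : Prop := out = categorize_split_lists_alt split_lists
instance (split_lists : List (List (List (String × String)))) (out : (List (List (String × String))) × (List (List (String × String))) × (List (List (String × String))) × (List (List (List (String × String))))) : Decidable (Spec_categorize_split_lists split_lists out) := by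
  unfold Spec_categorize_split_lists
  exact @instDecidableEqProd _ _ inferInstance (@instDecidableEqProd _ _ inferInstance (@instDecidableEqProd _ _ inferInstance inferInstance)) out (categorize_split_lists_alt split_lists)

-- ===== CLAIM (what is proved, stated in full; the proofs are below) =====
def Claim_equal_categorize_split_lists : Prop := ∀ (split_lists : List (List (List (String × String)))), Dom_categorize_split_lists split_lists → Spec_categorize_split_lists split_lists (categorize_split_lists split_lists)

-- ===== LEMMAS AND PROOFS =====

-- pvKind takes only the four bucket values
lemma pvKind_cases (s : List (List (String × String))) :
    pvKind s = 0 ∨ pvKind s = 1 ∨ pvKind s = 2 ∨ pvKind s = 3 := by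
  cases s with
  | nil => simp [pvKind]
  | cons item rest =>
    cases rest with
    | cons b bs => simp [pvKind]
    | nil =>
      simp only [pvKind]
      split_ifs <;> simp

-- one step of A's loop, expressed through B's classifier
lemma pvStep_kind (c m om : List (List (String × String))) (oth : List (List (List (String × String)))) (s : List (List (String × String))) :
    pvStepA (c, m, om, oth) s =
      if pvKind s = 0 then (c ++ [s.headD []], m, om, oth)
      else if pvKind s = 1 then (c, m ++ [s.headD []], om, oth)
      else if pvKind s = 2 then (c, m, om ++ [s.headD []], oth)
      else (c, m, om, oth ++ [s]) := by
  cases s with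
  | nil => simp [pvStepA, pvKind]
  | cons item rest =>
    cases rest with
    | cons b bs => simp [pvStepA, pvKind]
    | nil =>
      simp only [pvStepA, pvKind, List.length_cons, List.length_nil]
      split_ifs <;> simp_all

-- loop invariant: A's fold from any accumulator appends exactly B's four filtered buckets
lemma pvFold_eq (l : List (List (List (String × String)))) :
    ∀ (c m om : List (List (String × String))) (oth : List (List (List (String × String)))),
    l.foldl pvStepA (c, m, om, oth) =
      (c ++ (l.filter (fun s => pvKind s == 0)).map (fun s => s.headD []),
       m ++ (l.filter (fun s => pvKind s == 1)).map (fun s => s.headD []),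
       om ++ (l.filter (fun s => pvKind s == 2)).map (fun s => s.headD []),
       oth ++ l.filter (fun s => pvKind s == 3)) := by
  induction l with
  | nil => intro c m om oth; simp
  | cons s t ih =>
    intro c m om oth
    rw [List.foldl_cons, pvStep_kind]
    rcases pvKind_cases s with hk | hk | hk | hk <;>
      simp [hk, ih]

-- ===== VERDICT (by name: the statement is the Claim_ definition above) =====
theorem categorize_split_lists_spec : Claim_equal_categorize_split_lists := by
  intro split_lists _
  unfold Spec_categorize_split_lists categorize_split_lists categorize_split_lists_alt
  simpa using pvFold_eq split_lists [] [] [] []
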